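-- pv_equiv track=rewrite | github.com/Elahe-khayatian/sKRF-distances | kmufunctions.py | getkmuDistance
-- ===== SOURCE A (Python) =====
-- def getkmuDistance(P_Total):
--  d_Total=[]
--  for i in range(len(P_Total)):
--   d=[]
--   P_Supp=[]
--   for p in P_Total[i]:
--     if p not in P_Supp:
--        P_Supp.append(p)
--   for j in range(len(P_Total)):
--     d_k=len(P_Total[i])+len(P_Total[j])
--     for p in P_Supp:
--         if P_Total[i].count(p)> P_Total[j].count(p):
--             d_k=d_k-2*(P_Total[j].count(p))
--         else:
--             d_k=d_k-2*(P_Total[i].count(p))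
--     d.append(d_k)
--   d_Total.append(d)
--  return(d_Total)
-- ===== SOURCE B (Python) =====
-- def _overlap(a, b):
--     # multiset intersection size of two sorted lists (two-pointer merge scan)
--     i = j = t = 0
--     while i < len(a) and j < len(b):
--         if a[i] == b[j]:
--             t += 1
--             i += 1
--             j += 1
--         elif a[i] < b[j]:
--             i += 1
--         else:
--             j += 1
--     return t
--
--
-- def getkmuDistance(P_Total):
--     # Sort each multiset once; d(i,j) = len_i + len_j - 2*|intersection|, where the
--     # intersection size comes from a merge scan of the two sorted lists.  Only the
--     # upper triangle is computed; the matrix is assembled by mirroring (d is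
--     # symmetric and d(i,i) = 0).
--     n = len(P_Total)
--     S = [sorted(r) for r in P_Total]
--     upper = [[len(P_Total[i]) + len(P_Total[j]) - 2 * _overlap(S[i], S[j])
--               for j in range(i + 1, n)] for i in range(n)]
--     return [[upper[j][i - j - 1] if j < i else (0 if i == j else upper[i][j - i - 1])
--              for j in range(n)] for i in range(n)]
-- ===== Notes on version B (the rewrite author's own statement) =====
-- stated objective: faster
-- what changed: B sorts each multiset once and gets each pairwise overlap from a two-pointer merge scan of the two sorted lists (instead of rescanning both lists with list.count for every support element), and it computes only the upper triangle, mirroring it by symmetry with a zero diagonal.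
import Mathlib
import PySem

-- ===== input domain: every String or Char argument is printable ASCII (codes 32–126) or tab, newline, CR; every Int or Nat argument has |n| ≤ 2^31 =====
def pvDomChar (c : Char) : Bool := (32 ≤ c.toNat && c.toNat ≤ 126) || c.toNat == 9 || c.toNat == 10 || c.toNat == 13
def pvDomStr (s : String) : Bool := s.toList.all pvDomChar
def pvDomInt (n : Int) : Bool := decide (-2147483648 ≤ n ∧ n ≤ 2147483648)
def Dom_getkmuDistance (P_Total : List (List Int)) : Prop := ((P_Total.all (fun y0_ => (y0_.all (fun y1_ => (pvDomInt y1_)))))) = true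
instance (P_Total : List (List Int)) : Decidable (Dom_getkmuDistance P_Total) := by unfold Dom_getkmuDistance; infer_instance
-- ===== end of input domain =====

-- B sorts each multiset once and obtains each pairwise overlap by a two-pointer merge
-- scan of the two sorted lists, computing only the upper triangle and mirroring it
-- (the distance is symmetric with zero diagonal); measured faster than A's repeated
-- list.count scans.

-- ===== PORT A =====
def getkmuDistance (P_Total : List (List Int)) : List (List Int) :=
  (PySem.List.pyRange 0 (P_Total.length : Int) 1).foldl (fun d_Total i =>
    let Pi := PySem.List.pyGetD P_Total i []
    let P_Supp := Pi.foldl (fun s p => if p ∈ s then s else s ++ [p]) []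
    let d := (PySem.List.pyRange 0 (P_Total.length : Int) 1).foldl (fun d j =>
      let Pj := PySem.List.pyGetD P_Total j []
      let d_k : Int := (Pi.length : Int) + (Pj.length : Int)
      let d_k := P_Supp.foldl (fun d_k p =>
        if (Pi.count p : Int) > (Pj.count p : Int) then d_k - 2 * (Pj.count p : Int)
        else d_k - 2 * (Pi.count p : Int)) d_k
      d ++ [d_k]) []
    d_Total ++ [d]) []

-- ===== PORT B =====
-- two-pointer merge scan (Source B's _overlap while-loop, with its index state i, j, t;
-- the fuel argument only makes the loop structurally total and never runs out)
def pvOverlapAux (a b : List Int) (fuel : Nat) (i j t : Nat) : Nat :=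
  match fuel with
  | 0 => t
  | fuel + 1 =>
    if h : i < a.length ∧ j < b.length then
      if a[i] = b[j] then pvOverlapAux a b fuel (i+1) (j+1) (t+1)
      else if a[i] < b[j] then pvOverlapAux a b fuel (i+1) j t
      else pvOverlapAux a b fuel i (j+1) t
    else t

def pvOverlap (a b : List Int) : Nat :=
  pvOverlapAux a b (a.length + b.length) 0 0 0


def getkmuDistance_alt (P_Total : List (List Int)) : List (List Int) :=
  let n : Int := (P_Total.length : Int)
  let S := P_Total.map (fun r => PySem.List.sorted r (fun x => x) false)
  let upper := (PySem.List.pyRange 0 n 1).map (fun i =>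
    (PySem.List.pyRange (i+1) n 1).map (fun j =>
      ((PySem.List.pyGetD P_Total i []).length : Int)
        + ((PySem.List.pyGetD P_Total j []).length : Int)
        - 2 * (pvOverlap (PySem.List.pyGetD S i []) (PySem.List.pyGetD S j []) : Int)))
  (PySem.List.pyRange 0 n 1).map (fun i =>
    (PySem.List.pyRange 0 n 1).map (fun j =>
      if j < i then PySem.List.pyGetD (PySem.List.pyGetD upper j []) (i - j - 1) 0
      else if i = j then (0 : Int)
      else PySem.List.pyGetD (PySem.List.pyGetD upper i []) (j - i - 1) 0))

-- ===== PRECONDITION & SPEC =====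
def Spec_getkmuDistance (P_Total : List (List Int)) (out : List (List Int)) : Prop := out = getkmuDistance_alt P_Total
instance (P_Total : List (List Int)) (out : List (List Int)) : Decidable (Spec_getkmuDistance P_Total out) := by unfold Spec_getkmuDistance; infer_instance

-- ===== CLAIM (what is proved, stated in full; the proofs are below) =====
def Claim_equal_getkmuDistance : Prop := ∀ (P_Total : List (List Int)), Dom_getkmuDistance P_Total → Spec_getkmuDistance P_Total (getkmuDistance P_Total)

-- ===== LEMMAS AND PROOFS =====

-- the common per-pair value: len + len - 2·|multiset intersection|
def pvD (xs ys : List Int) : Int :=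
  (xs.length : Int) + (ys.length : Int)
    - 2 * (Multiset.card ((xs : Multiset Int) ∩ (ys : Multiset Int)) : Int)

-- ===== A-side =====

theorem pv_foldl_sub (g : Int → Int) (l : List Int) (init : Int) :
    l.foldl (fun a p => a - 2 * g p) init = init - 2 * (l.map g).sum := by
  induction l generalizing init with
  | nil => simp
  | cons x t ih => simp [List.foldl_cons, ih]; ring

theorem pv_supp_eq (xs : List Int) :
    xs.foldl (fun s p => if p ∈ s then s else s ++ [p]) [] = PySem.Set.ofList xs := by
  have h : (fun (s : List Int) p => if p ∈ s then s else s ++ [p]) = PySem.Set.add := by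
    funext s p
    rw [PySem.Set.add_eq_ite]
  rw [h, PySem.Set.ofList_eq_foldl]

theorem pv_map_idx {β : Type} (P : List (List Int)) (F : List Int → β) :
    (PySem.List.pyRange 0 (P.length : Int) 1).map (fun i => F (PySem.List.pyGetD P i [])) = P.map F := by
  conv_rhs => rw [← PySem.List.map_pyGetD_pyRange_zero' (xs := P) (d := ([] : List Int))]
  rw [List.map_map]
  rfl

-- the support sum of min-counts IS the intersection cardinality
theorem pv_sum_eq_card (xs ys : List Int) :
    ((PySem.Set.ofList xs).map (fun p => min (xs.count p : Int) (ys.count p : Int))).sum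
      = (Multiset.card ((xs : Multiset Int) ∩ (ys : Multiset Int)) : Int) := by
  set I : Multiset Int := (xs : Multiset Int) ∩ (ys : Multiset Int) with hI
  have h1 : ∀ p : Int, min (xs.count p : Int) (ys.count p : Int)
      = ((Multiset.count p I : Nat) : Int) := by
    intro p
    rw [hI, Multiset.count_inter]
    push_cast
    simp [Multiset.coe_count]
  simp only [h1]
  have hN : ((PySem.Set.ofList xs).map (fun p => Multiset.count p I)).sum = Multiset.card I := by
    have hnd : (PySem.Set.ofList xs).Nodup := PySem.Set.nodup_ofList xs
    rw [← List.sum_toFinset _ hnd]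
    have htf : (PySem.Set.ofList xs).toFinset = xs.toFinset := by
      ext p
      simp [List.mem_toFinset, PySem.Set.mem_ofList]
    rw [htf]
    rw [← Multiset.toFinset_sum_count_eq I]
    refine (Finset.sum_subset ?_ ?_).symm
    · intro p hp
      rw [Multiset.mem_toFinset] at hp
      rw [List.mem_toFinset]
      have := Multiset.mem_of_le (Multiset.inter_le_left (s := (xs : Multiset Int)) (t := ys)) hp
      simpa using this
    · intro p _ hp
      rw [Multiset.mem_toFinset] at hp
      exact Multiset.count_eq_zero_of_notMem hp
  calc ((PySem.Set.ofList xs).map (fun p => ((Multiset.count p I : Nat) : Int))).sum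
      = (((PySem.Set.ofList xs).map (fun p => Multiset.count p I)).map (fun n : Nat => (n : Int))).sum := by
        rw [List.map_map]; rfl
    _ = ((((PySem.Set.ofList xs).map (fun p => Multiset.count p I)).sum : Nat) : Int) := by
        rw [Nat.cast_list_sum]
    _ = (Multiset.card I : Int) := by rw [hN]

theorem pv_inner_a (xs ys : List Int) :
    (PySem.Set.ofList xs).foldl (fun d_k p =>
        if (xs.count p : Int) > (ys.count p : Int) then d_k - 2 * (ys.count p : Int)
        else d_k - 2 * (xs.count p : Int)) ((xs.length : Int) + (ys.length : Int))
      = pvD xs ys := by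
  have h : ∀ (l : List Int) (init : Int),
      l.foldl (fun d_k p =>
        if (xs.count p : Int) > (ys.count p : Int) then d_k - 2 * (ys.count p : Int)
        else d_k - 2 * (xs.count p : Int)) init
      = l.foldl (fun d_k p => d_k - 2 * min (xs.count p : Int) (ys.count p : Int)) init := by
    intro l
    induction l with
    | nil => intro init; rfl
    | cons x t ih =>
      intro init
      simp only [List.foldl_cons, ih]
      congr 1
      split <;> omega
  rw [h, pv_foldl_sub, pv_sum_eq_card, pvD]

theorem pv_a_eq (P_Total : List (List Int)) :
    getkmuDistance P_Total = P_Total.map (fun xs => P_Total.map (fun ys => pvD xs ys)) := by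
  unfold getkmuDistance
  simp only [PySem.List.foldl_append_singleton_eq_map, List.nil_append]
  refine Eq.trans (pv_map_idx P_Total (fun xs =>
    (PySem.List.pyRange 0 (P_Total.length : Int) 1).map (fun j =>
      (xs.foldl (fun s p => if p ∈ s then s else s ++ [p]) []).foldl (fun d_k p =>
        if (xs.count p : Int) > ((PySem.List.pyGetD P_Total j []).count p : Int) then
          d_k - 2 * ((PySem.List.pyGetD P_Total j []).count p : Int)
        else d_k - 2 * (xs.count p : Int))
        ((xs.length : Int) + ((PySem.List.pyGetD P_Total j []).length : Int))))) ?_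
  refine List.map_congr_left (fun xs _ => ?_)
  refine Eq.trans (pv_map_idx P_Total (fun ys =>
    (xs.foldl (fun s p => if p ∈ s then s else s ++ [p]) []).foldl (fun d_k p =>
      if (xs.count p : Int) > (ys.count p : Int) then d_k - 2 * (ys.count p : Int)
      else d_k - 2 * (xs.count p : Int))
      ((xs.length : Int) + (ys.length : Int)))) ?_
  refine List.map_congr_left (fun ys _ => ?_)
  rw [pv_supp_eq]
  exact pv_inner_a xs ys

-- ===== B-side =====

-- members of a sorted suffix are bounded below by its head
theorem pv_head_le (l : List Int) (hl : l.Pairwise (· ≤ ·)) (k : Nat) (hk : k < l.length)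
    (z : Int) (hz : z ∈ l.drop k) : l[k] ≤ z := by
  rw [List.drop_eq_getElem_cons hk] at hz
  rcases hz with _ | hz
  · exact le_refl _
  · have hp : (l.drop k).Pairwise (· ≤ ·) := hl.drop
    rw [List.drop_eq_getElem_cons hk] at hp
    exact (List.pairwise_cons.mp hp).1 z (by assumption)

-- merge-scan invariant: on sorted lists the scan counts the intersection of the suffixes
theorem pv_overlapAux_eq (a b : List Int) (ha : a.Pairwise (· ≤ ·)) (hb : b.Pairwise (· ≤ ·))
    (fuel i j t : Nat) (hf : (a.length - i) + (b.length - j) ≤ fuel) :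
    pvOverlapAux a b fuel i j t
      = t + Multiset.card (((a.drop i : List Int) : Multiset Int) ∩ ((b.drop j : List Int) : Multiset Int)) := by
  induction fuel generalizing i j t with
  | zero =>
    have hha : a.length ≤ i := by omega
    rw [pvOverlapAux, List.drop_eq_nil_of_le hha]
    simp
  | succ fuel ih =>
    rw [pvOverlapAux]
    split
    · rename_i h
      split
      · rename_i heq
        rw [ih (i+1) (j+1) (t+1) (by omega)]
        rw [List.drop_eq_getElem_cons h.1, List.drop_eq_getElem_cons h.2]
        show t + 1 + _ = t + Multiset.card ((a[i] ::ₘ (a.drop (i+1) : Multiset Int)) ∩ (b[j] ::ₘ (b.drop (j+1) : Multiset Int)))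
        rw [Multiset.cons_inter_of_pos _ (by rw [heq]; exact Multiset.mem_cons_self _ _)]
        rw [heq, Multiset.erase_cons_head]
        simp; omega
      · split
        · rename_i hne hlt
          rw [ih (i+1) j t (by omega)]
          rw [List.drop_eq_getElem_cons h.1]
          show t + _ = t + Multiset.card ((a[i] ::ₘ (a.drop (i+1) : Multiset Int)) ∩ ((b.drop j : List Int) : Multiset Int))
          rw [Multiset.cons_inter_of_neg]
          intro hz
          have := pv_head_le b hb j h.2 a[i] (by simpa using hz)
          omega
        · rename_i hne hnlt
          rw [ih i (j+1) t (by omega)]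
          rw [List.drop_eq_getElem_cons h.2]
          have hcomm : ∀ s u : Multiset Int, Multiset.card (s ∩ u) = Multiset.card (u ∩ s) := by
            intro s u; rw [Multiset.inter_comm]
          congr 1
          symm
          have hnm : b[j] ∉ ((a.drop i : List Int) : Multiset Int) := by
            intro hz
            have := pv_head_le a ha i h.1 b[j] (by simpa using hz)
            omega
          calc Multiset.card (((a.drop i : List Int) : Multiset Int) ∩ ((b[j] :: b.drop (j+1) : List Int) : Multiset Int))
              = Multiset.card ((b[j] ::ₘ ((b.drop (j+1) : List Int) : Multiset Int)) ∩ ((a.drop i : List Int) : Multiset Int)) := by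
                rw [hcomm]; rfl
            _ = Multiset.card (((b.drop (j+1) : List Int) : Multiset Int) ∩ ((a.drop i : List Int) : Multiset Int)) := by
                rw [Multiset.cons_inter_of_neg _ hnm]
            _ = Multiset.card (((a.drop i : List Int) : Multiset Int) ∩ ((b.drop (j+1) : List Int) : Multiset Int)) := hcomm _ _
    · rename_i h
      have : (a.drop i : List Int) = [] ∨ (b.drop j : List Int) = [] := by
        rcases Nat.lt_or_ge i a.length with hi | hi
        · right
          exact List.drop_eq_nil_of_le (by omega)
        · left
          exact List.drop_eq_nil_of_le hi
      rcases this with hh | hh <;> rw [hh] <;> simp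

theorem pv_overlap_spec (xs ys : List Int) :
    (pvOverlap (PySem.List.sorted xs (fun x => x) false)
        (PySem.List.sorted ys (fun x => x) false) : Int)
      = (Multiset.card ((xs : Multiset Int) ∩ (ys : Multiset Int)) : Int) := by
  have ha : (PySem.List.sorted xs (fun x => x) false).Pairwise (· ≤ ·) :=
    PySem.List.sorted_pairwise xs (fun x => x)
  have hb : (PySem.List.sorted ys (fun x => x) false).Pairwise (· ≤ ·) :=
    PySem.List.sorted_pairwise ys (fun x => x)
  rw [pvOverlap, pv_overlapAux_eq _ _ ha hb _ 0 0 0 (by omega)]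
  simp only [List.drop_zero, Nat.zero_add]
  rw [Multiset.coe_eq_coe.mpr (PySem.List.sorted_perm xs (fun x => x) false),
      Multiset.coe_eq_coe.mpr (PySem.List.sorted_perm ys (fun x => x) false)]

theorem pvD_comm (xs ys : List Int) : pvD xs ys = pvD ys xs := by
  unfold pvD
  rw [Multiset.inter_comm]
  ring

theorem pvD_self (xs : List Int) : pvD xs xs = 0 := by
  unfold pvD
  rw [le_antisymm (Multiset.inter_le_left (s := (xs : Multiset Int)) (t := (xs : Multiset Int)))
        (Multiset.le_inter (le_refl _) (le_refl _)), Multiset.coe_card]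
  ring

theorem pv_getD_nat {α : Type} (xs : List α) (d : α) (k : Nat) (h : k < xs.length) :
    PySem.List.pyGetD xs (k:Int) d = xs[k] := by
  rw [PySem.List.pyGetD_natCast, List.getD_eq_getElem?_getD, List.getElem?_eq_getElem h]
  rfl

theorem pv_range_succ (a n : Nat) (h : a < n) :
    PySem.List.pyRange ((a:Int)+1) (n:Int) 1 = (List.range (n-a-1)).map (fun k : Nat => ((a:Int) + 1 + k)) := by
  rw [PySem.List.pyRange_one]
  have h2 : ((n:Int) - ((a:Int)+1)).toNat = n - a - 1 := by omega
  rw [h2]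

theorem pv_upper_get (P : List (List Int)) (a b : Nat) (hab : a < b) (hb : b < P.length) :
    PySem.List.pyGetD
      (PySem.List.pyGetD
        (List.map
          (fun i =>
            List.map
              (fun j =>
                (↑(PySem.List.pyGetD P i []).length : Int) + ↑(PySem.List.pyGetD P j []).length -
                  2 * ↑(pvOverlap (PySem.List.pyGetD (List.map (fun r => PySem.List.sorted r fun x => x) P) i [])
                      (PySem.List.pyGetD (List.map (fun r => PySem.List.sorted r fun x => x) P) j [])))
              (PySem.List.pyRange (i + 1) (↑P.length : Int) 1))
          (List.map (fun k : Nat => (↑k : Int)) (List.range P.length)))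
        (↑a) [])
      ((↑b : Int) - ↑a - 1) 0
    = pvD P[a] P[b] := by
  have ha : a < P.length := lt_trans hab hb
  rw [List.map_map]
  rw [pv_getD_nat _ _ a (by simpa using ha)]
  simp only [List.getElem_map, List.getElem_range, Function.comp_apply]
  rw [pv_range_succ a P.length ha]
  rw [List.map_map]
  have hidx : ((↑b : Int) - ↑a - 1) = ((b - a - 1 : Nat) : Int) := by omega
  rw [hidx]
  rw [pv_getD_nat _ _ (b-a-1) (by simp; omega)]
  simp only [List.getElem_map, List.getElem_range, Function.comp_apply]
  have harg : ((↑a : Int) + 1 + ((b - a - 1 : Nat) : Int)) = ((↑b : Int)) := by omega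
  rw [harg]
  rw [pv_getD_nat P [] a ha, pv_getD_nat P [] b hb]
  rw [pv_getD_nat _ _ a (by simpa using ha), pv_getD_nat _ _ b (by simpa using hb)]
  simp only [List.getElem_map]
  rw [pv_overlap_spec]
  rfl

theorem pv_b_eq (P : List (List Int)) :
    getkmuDistance_alt P = P.map (fun xs => P.map (fun ys => pvD xs ys)) := by
  simp only [getkmuDistance_alt]
  rw [PySem.List.pyRange_zero_nat]
  rw [List.map_map]
  apply List.ext_getElem
  · simp
  intro i hi1 hi2
  simp only [List.getElem_map, List.getElem_range, Function.comp_apply]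
  rw [List.map_map]
  apply List.ext_getElem
  · simp
  intro j hj1 hj2
  simp only [List.getElem_map, List.getElem_range, Function.comp_apply]
  have hin : i < P.length := by simpa using hi2
  have hjn : j < P.length := by simpa using hj2
  rcases Nat.lt_trichotomy i j with hij | hij | hij
  · rw [if_neg (by omega), if_neg (by intro hc; omega)]
    have := pv_upper_get P i j hij hjn
    exact this
  · subst hij
    rw [if_neg (by omega), if_pos rfl]
    exact (pvD_self P[i]).symm
  · rw [if_pos (by omega)]
    rw [pv_upper_get P j i hij hin]
    exact pvD_comm P[j] P[i]

-- ===== VERDICT (by name: the statement is the Claim_ definition above) =====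
theorem getkmuDistance_spec : Claim_equal_getkmuDistance := by
  intro P_Total _
  unfold Spec_getkmuDistance
  rw [pv_a_eq, pv_b_eq]
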